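-- pv_equiv track=rewrite | github.com/Lauriy/advent-of-code-2024 | src/day_14.py | find_longest_vertical_line
-- ===== SOURCE A (Python) =====
-- def find_longest_vertical_line(
--     points: set[tuple[int, int]],
--     width: int,
--     height: int,
-- ) -> tuple[int, int]:
--     max_length = best_x = 0
--
--     for x in range(width):
--         current_streak = 0
--         for y in range(height):
--             if (x, y) in points:
--                 current_streak += 1
--                 if current_streak > max_length:
--                     max_length = current_streak
--                     best_x = x
--             else:
--                 current_streak = 0
--
--     return max_length, best_x
-- ===== SOURCE B (Python) =====
-- def find_longest_vertical_line(points, width, height):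
--     cols = {}
--     for x, y in points:
--         if 0 <= x < width and 0 <= y < height:
--             cols.setdefault(x, set()).add(y)
--
--     max_length = best_x = 0
--     for x in sorted(cols):
--         prev = None
--         streak = 0
--         for y in sorted(cols[x]):
--             streak = streak + 1 if prev == y - 1 else 1
--             if streak > max_length:
--                 max_length, best_x = streak, x
--             prev = y
--     return max_length, best_x
-- ===== Notes on version B (the rewrite author's own statement) =====
-- stated objective: faster
-- what changed: Instead of scanning every (x, y) cell of the width-by-height grid, B groups the in-range points by column into a dict of y-sets and scans each column's sorted ys once, chaining consecutive ys into runs.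
import Mathlib
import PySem

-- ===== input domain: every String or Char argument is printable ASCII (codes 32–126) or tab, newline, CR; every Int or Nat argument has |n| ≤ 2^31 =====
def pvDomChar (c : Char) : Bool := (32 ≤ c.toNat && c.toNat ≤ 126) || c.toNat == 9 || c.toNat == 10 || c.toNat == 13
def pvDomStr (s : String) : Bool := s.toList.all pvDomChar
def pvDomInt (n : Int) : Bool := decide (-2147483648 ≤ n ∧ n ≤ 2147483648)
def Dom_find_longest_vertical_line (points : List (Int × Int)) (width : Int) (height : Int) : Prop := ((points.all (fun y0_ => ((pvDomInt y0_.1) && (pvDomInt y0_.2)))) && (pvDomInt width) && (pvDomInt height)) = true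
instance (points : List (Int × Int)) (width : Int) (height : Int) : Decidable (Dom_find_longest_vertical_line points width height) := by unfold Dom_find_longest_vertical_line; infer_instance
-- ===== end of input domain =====

-- B groups the in-range points by column in a dict of y-sets and scans each column's sorted ys once
-- (O(n log n) in the number of points) instead of A's full width×height grid scan; return value only.


-- ===== PORT A =====
-- inner-loop body of A: state (max_length, best_x, current_streak), one grid cell y of column x
def gridStep (points : List (Int × Int)) (x : Int) (s : Int × Int × Int) (y : Int) : Int × Int × Int :=
  if (x, y) ∈ points then
    let cs := s.2.2 + 1
    if cs > s.1 then (cs, x, cs) else (s.1, s.2.1, cs)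
  else (s.1, s.2.1, 0)

def find_longest_vertical_line (points : List (Int × Int)) (width : Int) (height : Int) : Int × Int :=
  (PySem.List.pyRange 0 width 1).foldl
    (fun (mb : Int × Int) x =>
      let s := (PySem.List.pyRange 0 height 1).foldl (gridStep points x) (mb.1, mb.2, 0)
      (s.1, s.2.1))
    (0, 0)

-- ===== PORT B =====
-- B's grouping pass: cols[x] = set of in-range ys of column x (Python: cols.setdefault(x, set()).add(y))
def colsOf (points : List (Int × Int)) (width : Int) (height : Int) : PySem.Dict Int (PySem.Set Int) :=
  points.foldl
    (fun d p =>
      if 0 ≤ p.1 ∧ p.1 < width ∧ 0 ≤ p.2 ∧ p.2 < height then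
        d.modify p.1 PySem.Set.empty (fun s => PySem.Set.add s p.2)
      else d)
    PySem.Dict.empty

-- B's inner-loop body: state ((max_length, best_x), prev, streak), one point y of column x
def runStep (x : Int) (s : (Int × Int) × Option Int × Int) (y : Int) : (Int × Int) × Option Int × Int :=
  let streak := if s.2.1 = some (y - 1) then s.2.2 + 1 else 1
  let mb := if streak > s.1.1 then (streak, x) else s.1
  (mb, some y, streak)

def find_longest_vertical_line_alt (points : List (Int × Int)) (width : Int) (height : Int) : Int × Int :=
  let cols := colsOf points width height
  (PySem.List.sorted cols.keys (fun k => k) false).foldl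
    (fun (mb : Int × Int) x =>
      ((PySem.List.sorted (cols.getD x PySem.Set.empty) (fun y => y) false).foldl
        (runStep x) (mb, none, 0)).1)
    (0, 0)

-- ===== PRECONDITION & SPEC =====
def Spec_find_longest_vertical_line (points : List (Int × Int)) (width : Int) (height : Int) (out : Int × Int) : Prop := out = find_longest_vertical_line_alt points width height
instance (points : List (Int × Int)) (width : Int) (height : Int) (out : Int × Int) : Decidable (Spec_find_longest_vertical_line points width height out) := by unfold Spec_find_longest_vertical_line; infer_instance

-- ===== CLAIM (what is proved, stated in full; the proofs are below) =====
def Claim_equal_find_longest_vertical_line : Prop := ∀ (points : List (Int × Int)) (width : Int) (height : Int), Dom_find_longest_vertical_line points width height → Spec_find_longest_vertical_line points width height (find_longest_vertical_line points width height)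

-- ===== LEMMAS AND PROOFS =====

-- the in-range ys of column x, in increasing order (what A's inner loop actually reacts to)
def colL (points : List (Int × Int)) (height : Int) (x : Int) : List Int :=
  (PySem.List.pyRange 0 height 1).filter (fun y => decide ((x, y) ∈ points))

-- L1: A's grid scan of column x from position a equals B's run scan of the member ys, under the
-- streak/prev invariant.
theorem grid_run_agree (points : List (Int × Int)) (x : Int) (h : Int) :
    ∀ (n : Nat) (a : Int), h - a ≤ n →
    ∀ (g : Int × Int × Int) (c : (Int × Int) × Option Int × Int),
      g.1 = c.1.1 → g.2.1 = c.1.2 →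
      (∀ p, c.2.1 = some p → p < a) →
      (c.2.1 = some (a - 1) → g.2.2 = c.2.2) →
      (c.2.1 ≠ some (a - 1) → g.2.2 = 0) →
      (((PySem.List.pyRange a h 1).foldl (gridStep points x) g).1
          = (((PySem.List.pyRange a h 1).filter (fun y => decide ((x, y) ∈ points))).foldl (runStep x) c).1.1)
      ∧ (((PySem.List.pyRange a h 1).foldl (gridStep points x) g).2.1
          = (((PySem.List.pyRange a h 1).filter (fun y => decide ((x, y) ∈ points))).foldl (runStep x) c).1.2) := by
  intro n
  induction n with
  | zero =>
    intro a ha g c h1 h2 h3 h4 h5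
    rw [PySem.List.pyRange_one_eq_nil (by omega)]
    simp [h1, h2]
  | succ n ih =>
    intro a ha g c h1 h2 h3 h4 h5
    by_cases hab : a < h
    · rw [PySem.List.pyRange_one_cons hab]
      obtain ⟨m, b, s⟩ := g
      obtain ⟨⟨m', b'⟩, pr, t⟩ := c
      simp only at h1 h2 h3 h4 h5
      subst h1; subst h2
      by_cases hm : (x, a) ∈ points
      · have hst : (if pr = some (a - 1) then t + 1 else 1) = s + 1 := by
          by_cases hc : pr = some (a - 1)
          · simp only [hc, if_true]
            have := h4 hc; omega
          · simp only [hc, if_false]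
            have := h5 hc; omega
        simp only [List.filter_cons, hm, decide_true, if_true, List.foldl_cons]
        apply ih (a + 1) (by omega)
        · -- max components agree
          simp only [gridStep, runStep, hm, if_true, hst]
          split_ifs <;> rfl
        · simp only [gridStep, runStep, hm, if_true, hst]
          split_ifs <;> rfl
        · intro p hp
          simp only [runStep] at hp
          cases hp; omega
        · intro hc
          simp only [gridStep, runStep, hm, if_true, hst]
          split_ifs <;> rfl
        · intro hc
          exfalso
          apply hc
          simp only [runStep]
          congr 1; omega
      · simp only [List.filter_cons, hm, decide_false]
        have hstep : gridStep points x (m, b, s) a = (m, b, 0) := by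
          simp [gridStep, hm]
        simp only [List.foldl_cons, hstep]
        apply ih (a + 1) (by omega) (m, b, 0) ((m, b), pr, t) rfl rfl
        · intro p hp
          have := h3 p hp; omega
        · intro hc
          exfalso
          simp only at hc
          have hpa : pr = some a := by rw [hc]; congr 1; omega
          have := h3 a hpa; omega
        · intro _; rfl
    · rw [PySem.List.pyRange_one_eq_nil (by omega)]
      simp [h1, h2]

-- colsOf, with the in-range test pulled out into a filter over the point list
theorem colsOf_eq_filter (points : List (Int × Int)) (width height : Int) :
    colsOf points width height
      = (points.filter (fun p => decide (0 ≤ p.1 ∧ p.1 < width ∧ 0 ≤ p.2 ∧ p.2 < height))).foldl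
          (fun d p => d.modify p.1 PySem.Set.empty (fun s => PySem.Set.add s p.2)) PySem.Dict.empty := by
  unfold colsOf
  rw [PySem.List.foldl_ite_eq_foldl_filter]

theorem mem_getD_foldl_modify_add (l : List (Int × Int)) (x y : Int) :
    ∀ (d : PySem.Dict Int (PySem.Set Int)),
      (y ∈ (l.foldl (fun d p => d.modify p.1 PySem.Set.empty (fun s => PySem.Set.add s p.2)) d).getD x PySem.Set.empty
        ↔ y ∈ d.getD x PySem.Set.empty ∨ (x, y) ∈ l) := by
  induction l with
  | nil => simp
  | cons p t ih =>
    intro d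
    simp only [List.foldl_cons, ih, PySem.Dict.getD_modify, List.mem_cons]
    by_cases hx : x = p.1
    · obtain ⟨p1, p2⟩ := p
      simp only at hx
      subst hx
      simp [PySem.Set.mem_add, Prod.ext_iff]
      tauto
    · simp only [if_neg hx]
      constructor
      · tauto
      · rintro (h | h | h)
        · tauto
        · exfalso; apply hx; rw [← h]
        · tauto

theorem nodup_getD_foldl_modify_add (l : List (Int × Int)) (x : Int) :
    ∀ (d : PySem.Dict Int (PySem.Set Int)), (d.getD x PySem.Set.empty).Nodup →
      ((l.foldl (fun d p => d.modify p.1 PySem.Set.empty (fun s => PySem.Set.add s p.2)) d).getD x PySem.Set.empty).Nodup := by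
  induction l with
  | nil => intro d hd; simpa using hd
  | cons p t ih =>
    intro d hd
    simp only [List.foldl_cons]
    apply ih
    rw [PySem.Dict.getD_modify]
    split_ifs with hx
    · subst hx
      exact PySem.Set.nodup_add _ _ hd
    · exact hd

-- L3a: membership in the grouped dict
theorem mem_getD_colsOf (points : List (Int × Int)) (width height : Int) (x y : Int) :
    y ∈ (colsOf points width height).getD x PySem.Set.empty ↔
      ((x, y) ∈ points ∧ 0 ≤ x ∧ x < width ∧ 0 ≤ y ∧ y < height) := by
  rw [colsOf_eq_filter, mem_getD_foldl_modify_add]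
  simp [List.mem_filter]

-- L3b: each column set is duplicate-free
theorem nodup_getD_colsOf (points : List (Int × Int)) (width height : Int) (x : Int) :
    ((colsOf points width height).getD x PySem.Set.empty).Nodup := by
  rw [colsOf_eq_filter]
  apply nodup_getD_foldl_modify_add
  simp

-- L3c: key membership
theorem mem_keys_colsOf (points : List (Int × Int)) (width height : Int) (x : Int) :
    x ∈ (colsOf points width height).keys ↔
      ∃ y, (x, y) ∈ points ∧ 0 ≤ x ∧ x < width ∧ 0 ≤ y ∧ y < height := by
  rw [colsOf_eq_filter, PySem.Dict.keys_foldl_modify_key]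
  simp only [PySem.Dict.keys_empty]
  rw [show PySem.Set.update ([] : PySem.Set Int)
        ((points.filter (fun p => decide (0 ≤ p.1 ∧ p.1 < width ∧ 0 ≤ p.2 ∧ p.2 < height))).map (·.1))
      = PySem.Set.ofList ((points.filter (fun p => decide (0 ≤ p.1 ∧ p.1 < width ∧ 0 ≤ p.2 ∧ p.2 < height))).map (·.1))
      from rfl]
  rw [PySem.Set.mem_ofList]
  simp only [List.mem_map, List.mem_filter]
  constructor
  · rintro ⟨⟨p1, p2⟩, ⟨hp, hb⟩, rfl⟩
    exact ⟨p2, hp, by simpa using hb⟩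
  · rintro ⟨y, hp, hb⟩
    exact ⟨(x, y), ⟨hp, by simpa using hb⟩, rfl⟩

theorem nodup_keys_colsOf (points : List (Int × Int)) (width height : Int) :
    (colsOf points width height).keys.Nodup := by
  rw [colsOf_eq_filter]
  apply PySem.Dict.nodup_keys_foldl_modify_key
  simp

-- L4: a duplicate-free list of ints inside [lo, hi) sorts to the membership filter of range(lo, hi)
theorem sorted_eq_filter_range (l : List Int) (lo hi : Int) (hnd : l.Nodup)
    (hb : ∀ z ∈ l, lo ≤ z ∧ z < hi) :
    PySem.List.sorted l (fun z => z) false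
      = (PySem.List.pyRange lo hi 1).filter (fun z => decide (z ∈ l)) := by
  apply PySem.List.sorted_eq_of_perm_of_pairwise_lt
  · apply (List.perm_ext_iff_of_nodup ((PySem.List.nodup_pyRange_one lo hi).filter _) hnd).mpr
    intro z
    simp only [List.mem_filter, PySem.List.mem_pyRange_one, decide_eq_true_eq]
    constructor
    · tauto
    · intro hz
      exact ⟨hb z hz, hz⟩
  · exact (PySem.List.pairwise_lt_pyRange_one lo hi).filter _

-- K1: A's column scan, started from (mb, streak 0), equals B's run scan over the member ys
theorem colScan_eq (points : List (Int × Int)) (height x : Int) (mb : Int × Int) :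
    (let s := (PySem.List.pyRange 0 height 1).foldl (gridStep points x) (mb.1, mb.2, 0)
     ((s.1, s.2.1) : Int × Int))
      = ((colL points height x).foldl (runStep x) (mb, none, 0)).1 := by
  have h := grid_run_agree points x height height.toNat 0 (by omega)
      (mb.1, mb.2, 0) (mb, none, 0) rfl rfl
      (by intro p hp; simp at hp) (by intro hc; simp at hc) (by intro _; rfl)
  obtain ⟨h1, h2⟩ := h
  unfold colL
  ext
  · exact h1
  · exact h2

-- K3: for a key x, the sorted column set is exactly the member-y list A reacts to
theorem sorted_getD_eq_colL (points : List (Int × Int)) (width height x : Int)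
    (hx : x ∈ (colsOf points width height).keys) :
    PySem.List.sorted ((colsOf points width height).getD x PySem.Set.empty) (fun y => y) false
      = colL points height x := by
  obtain ⟨y0, _, hx0, hxw, _, _⟩ := (mem_keys_colsOf points width height x).mp hx
  rw [sorted_eq_filter_range _ 0 height (nodup_getD_colsOf points width height x)
      (by intro z hz
          have := (mem_getD_colsOf points width height x z).mp hz
          exact ⟨this.2.2.2.1, this.2.2.2.2⟩)]
  unfold colL
  apply List.filter_congr
  intro y hy
  have hyb := (PySem.List.mem_pyRange_one).mp hy
  simp only [decide_eq_decide]
  rw [mem_getD_colsOf]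
  constructor
  · tauto
  · intro hp
    exact ⟨hp, hx0, hxw, hyb.1, hyb.2⟩

-- K2: a column without a key contributes nothing
theorem colL_eq_nil (points : List (Int × Int)) (width height x : Int)
    (hxw : 0 ≤ x ∧ x < width) (hx : x ∉ (colsOf points width height).keys) :
    colL points height x = [] := by
  unfold colL
  rw [List.filter_eq_nil_iff]
  intro y hy
  have hyb := (PySem.List.mem_pyRange_one).mp hy
  simp only [decide_eq_true_eq]
  intro hp
  exact hx ((mem_keys_colsOf points width height x).mpr ⟨y, hp, hxw.1, hxw.2, hyb.1, hyb.2⟩)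

-- ===== VERDICT (by name: the statement is the Claim_ definition above) =====
theorem find_longest_vertical_line_spec : Claim_equal_find_longest_vertical_line := by
  unfold Claim_equal_find_longest_vertical_line
  intro points width height _
  unfold Spec_find_longest_vertical_line
  unfold find_longest_vertical_line find_longest_vertical_line_alt
  simp only
  -- A's outer step, named
  have hA : ∀ (mb : Int × Int) (x : Int),
      (let s := (PySem.List.pyRange 0 height 1).foldl (gridStep points x) (mb.1, mb.2, 0)
       ((s.1, s.2.1) : Int × Int)) = ((colL points height x).foldl (runStep x) (mb, none, 0)).1 :=
    fun mb x => colScan_eq points height x mb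
  calc
    (PySem.List.pyRange 0 width 1).foldl
        (fun (mb : Int × Int) x =>
          let s := (PySem.List.pyRange 0 height 1).foldl (gridStep points x) (mb.1, mb.2, 0)
          ((s.1, s.2.1) : Int × Int)) (0, 0)
        = (PySem.List.pyRange 0 width 1).foldl
            (fun (mb : Int × Int) x =>
              if x ∈ (colsOf points width height).keys then
                ((colL points height x).foldl (runStep x) (mb, none, 0)).1
              else mb) (0, 0) := by
          apply PySem.List.foldl_congr_mem
          intro mb x hx
          rw [hA]
          by_cases hk : x ∈ (colsOf points width height).keys
          · rw [if_pos hk]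
          · rw [if_neg hk, colL_eq_nil points width height x
                (by have := (PySem.List.mem_pyRange_one).mp hx; exact ⟨this.1, this.2⟩) hk]
            rfl
    _ = ((PySem.List.pyRange 0 width 1).filter
            (fun x => decide (x ∈ (colsOf points width height).keys))).foldl
          (fun (mb : Int × Int) x => ((colL points height x).foldl (runStep x) (mb, none, 0)).1)
          (0, 0) := by
          rw [PySem.List.foldl_ite_eq_foldl_filter]
    _ = (PySem.List.sorted (colsOf points width height).keys (fun k => k) false).foldl
          (fun (mb : Int × Int) x => ((colL points height x).foldl (runStep x) (mb, none, 0)).1)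
          (0, 0) := by
          rw [sorted_eq_filter_range (colsOf points width height).keys 0 width
              (nodup_keys_colsOf points width height)
              (by intro z hz
                  obtain ⟨y, _, h1, h2, _, _⟩ := (mem_keys_colsOf points width height z).mp hz
                  exact ⟨h1, h2⟩)]
    _ = (PySem.List.sorted (colsOf points width height).keys (fun k => k) false).foldl
          (fun (mb : Int × Int) x =>
            ((PySem.List.sorted ((colsOf points width height).getD x PySem.Set.empty)
                (fun y => y) false).foldl (runStep x) (mb, none, 0)).1)
          (0, 0) := by
          apply PySem.List.foldl_congr_mem
          intro mb x hx
          rw [sorted_getD_eq_colL points width height x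
              ((PySem.List.mem_sorted _ _ _ _).mp hx)]
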